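-- pv_equiv track=rewrite | github.com/copperdogma/doc-web | modules/portionize/fine_segment_gameplay_v1/main.py | expand_candidates
-- ===== SOURCE A (Python) =====
-- from itertools import product
-- from typing import List, Dict, Optional, Set, Tuple
--
-- CHAR_OPTIONS = {
--     "o": ["0"], "O": ["0"],
--     "l": ["1", "8"], "I": ["1"], "i": ["1"],
--     "b": ["6", "8"], "B": ["8"],
--     "g": ["9"], "q": ["9"],
--     "s": ["5", "8"], "S": ["5", "8"],
--     "z": ["2"],
--     ":": ["", "1", "2"], ".": [""], "'": [""], "`": [""], '"': [""],
--     "-": [""], "–": [""], "—": [""],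
--     "%": ["", "2"],
-- }
--
-- def expand_candidates(token: str, max_combos: int = 32) -> List[int]:
--     """Generate plausible numeric ids from a short token (reuse from detect_gameplay_numbers_v1)."""
--     options: List[List[str]] = []
--     for ch in token:
--         if ch.isdigit():
--             options.append([ch])
--         elif ch in CHAR_OPTIONS:
--             options.append(CHAR_OPTIONS[ch])
--         elif ch.isspace():
--             continue
--         else:
--             return []
--         combo_est = 1
--         for opt in options:
--             combo_est *= len(opt)
--         if combo_est > max_combos:
--             return []
--
--     combos = set()
--     for parts in product(*options) if options else []:
--         num_str = "".join(parts)
--         if not num_str or len(num_str) > 3: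
--             continue
--         if num_str.startswith("0"):
--             continue
--         combos.add(int(num_str))
--     return sorted(combos)
-- ===== SOURCE B (Python) =====
-- CHAR_OPTIONS = {
--     "o": ["0"], "O": ["0"],
--     "l": ["1", "8"], "I": ["1"], "i": ["1"],
--     "b": ["6", "8"], "B": ["8"],
--     "g": ["9"], "q": ["9"],
--     "s": ["5", "8"], "S": ["5", "8"],
--     "z": ["2"],
--     ":": ["", "1", "2"], ".": [""], "'": [""], "`": [""], '"': [""],
--     "-": [""], "–": [""], "—": [""],
--     "%": ["", "2"],
-- }
--
-- def expand_candidates(token: str, max_combos: int = 32) -> list: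
--     """Incrementally build candidate digit strings instead of options + itertools.product."""
--     partials = [""]
--     for ch in token:
--         if ch.isdigit():
--             opts = [ch]
--         elif ch in CHAR_OPTIONS:
--             opts = CHAR_OPTIONS[ch]
--         elif ch.isspace():
--             continue
--         else:
--             return []
--         partials = [p + o for p in partials for o in opts]
--         if len(partials) > max_combos:
--             return []
--     results = set()
--     for p in partials:
--         if p and len(p) <= 3 and not p.startswith("0"):
--             results.add(int(p))
--     return sorted(results)
-- ===== Notes on version B (the rewrite author's own statement) =====
-- stated objective: alternative
-- what changed: B builds the candidate strings incrementally (partials extended char by char, cap enforced via len(partials)) instead of A's two-phase options-list + itertools.product with a re-computed combo estimate after every char.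
import Mathlib
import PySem

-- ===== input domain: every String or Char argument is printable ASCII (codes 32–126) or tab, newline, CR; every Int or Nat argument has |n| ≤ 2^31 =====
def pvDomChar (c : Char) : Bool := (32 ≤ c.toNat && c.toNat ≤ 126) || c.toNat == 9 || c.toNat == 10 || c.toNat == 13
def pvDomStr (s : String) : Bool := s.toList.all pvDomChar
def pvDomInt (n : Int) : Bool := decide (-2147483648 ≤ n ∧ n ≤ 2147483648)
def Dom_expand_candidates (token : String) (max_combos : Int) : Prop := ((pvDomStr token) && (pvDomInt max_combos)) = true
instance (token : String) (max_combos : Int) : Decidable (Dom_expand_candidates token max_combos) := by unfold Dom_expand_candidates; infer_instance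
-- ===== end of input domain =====

-- B replaces A's two phases (per-char options list + itertools.product) by one incremental partial-string pass, capping via len(partials); same results, similar cost.

-- shared module constant CHAR_OPTIONS, as a lookup (membership test + value); exact transliteration of the dict
def pyCharOptions? (ch : Char) : Option (List (List Char)) :=
  if ch = 'o' then some [['0']] else if ch = 'O' then some [['0']]
  else if ch = 'l' then some [['1'], ['8']] else if ch = 'I' then some [['1']] else if ch = 'i' then some [['1']]
  else if ch = 'b' then some [['6'], ['8']] else if ch = 'B' then some [['8']]
  else if ch = 'g' then some [['9']] else if ch = 'q' then some [['9']]
  else if ch = 's' then some [['5'], ['8']] else if ch = 'S' then some [['5'], ['8']]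
  else if ch = 'z' then some [['2']]
  else if ch = ':' then some [[], ['1'], ['2']] else if ch = '.' then some [[]] else if ch = '\'' then some [[]]
  else if ch = '`' then some [[]] else if ch = '"' then some [[]]
  else if ch = '-' then some [[]] else if ch = '–' then some [[]] else if ch = '—' then some [[]]
  else if ch = '%' then some [[], ['2']]
  else none

-- ===== PORT A =====
-- itertools.product(*options): leftmost factor varies slowest
def pvProduct : List (List (List Char)) → List (List (List Char))
  | [] => [[]]
  | o :: rest => o.flatMap (fun x => (pvProduct rest).map (x :: ·))

-- A's first loop: build options; early return (none = Python's `return []`) on a foreign char or when combo_est exceeds the cap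
def pvOptionsA : List Char → Int → List (List (List Char)) → Option (List (List (List Char)))
  | [], _, acc => some acc
  | c :: rest, maxc, acc =>
    if PySem.Chars.isdigit c then
      let acc' := acc ++ [[[c]]]
      if acc'.foldl (fun e o => e * (o.length : Int)) 1 > maxc then none
      else pvOptionsA rest maxc acc'
    else match pyCharOptions? c with
      | some opts =>
        let acc' := acc ++ [opts]
        if acc'.foldl (fun e o => e * (o.length : Int)) 1 > maxc then none
        else pvOptionsA rest maxc acc'
      | none =>
        if PySem.Chars.isspace c then pvOptionsA rest maxc acc
        else none

def expand_candidates (token : String) (max_combos : Int) : List Int :=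
  match pvOptionsA token.toList max_combos [] with
  | none => []
  | some options =>
    let prod := if options = [] then [] else pvProduct options
    let combos : PySem.Set Int := prod.foldl (fun s parts =>
        let num := parts.flatten
        if num = [] ∨ num.length > 3 then s
        else if PySem.Chars.startswith num ['0'] then s
        else PySem.Set.add s ((PySem.Int.ofChars? num).getD 0)) PySem.Set.empty
    PySem.List.sorted combos (fun x => x) false

-- ===== PORT B =====
-- [p + o for p in partials for o in opts]
def pvExtend (partials opts : List (List Char)) : List (List Char) :=
  partials.flatMap (fun p => opts.map (fun o => p ++ o))

-- B's single loop: extend every partial by every option per char; early return (none) on a foreign char or len(partials) > cap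
def pvPartialsB : List Char → Int → List (List Char) → Option (List (List Char))
  | [], _, partials => some partials
  | c :: rest, maxc, partials =>
    if PySem.Chars.isdigit c then
      let p' := pvExtend partials [[c]]
      if (p'.length : Int) > maxc then none else pvPartialsB rest maxc p'
    else match pyCharOptions? c with
      | some opts =>
        let p' := pvExtend partials opts
        if (p'.length : Int) > maxc then none else pvPartialsB rest maxc p'
      | none =>
        if PySem.Chars.isspace c then pvPartialsB rest maxc partials
        else none

def expand_candidates_alt (token : String) (max_combos : Int) : List Int :=
  match pvPartialsB token.toList max_combos [[]] with
  | none => []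
  | some partials =>
    let results : PySem.Set Int := partials.foldl (fun s p =>
        if p ≠ [] ∧ p.length ≤ 3 ∧ ¬ PySem.Chars.startswith p ['0']
        then PySem.Set.add s ((PySem.Int.ofChars? p).getD 0) else s) PySem.Set.empty
    PySem.List.sorted results (fun x => x) false

-- ===== PRECONDITION & SPEC =====
def Spec_expand_candidates (token : String) (max_combos : Int) (out : List Int) : Prop := out = expand_candidates_alt token max_combos
instance (token : String) (max_combos : Int) (out : List Int) : Decidable (Spec_expand_candidates token max_combos out) := by unfold Spec_expand_candidates; infer_instance

-- ===== CLAIM (what is proved, stated in full; the proofs are below) =====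
def Claim_equal_expand_candidates : Prop := ∀ (token : String) (max_combos : Int), Dom_expand_candidates token max_combos → Spec_expand_candidates token max_combos (expand_candidates token max_combos)

-- ===== LEMMAS AND PROOFS =====

-- extending the partials = appending one options list before taking the product
theorem pvProduct_append_single (os : List (List (List Char))) (o : List (List Char)) :
    (pvProduct (os ++ [o])).map List.flatten = pvExtend ((pvProduct os).map List.flatten) o := by
  induction os with
  | nil =>
    simp only [List.nil_append, pvProduct, pvExtend, List.map_flatMap, List.flatMap_map]
    induction o with
    | nil => simp [List.flatMap]
    | cons y ys ihy => simp_all [List.flatMap]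
  | cons a t ih =>
    simp only [List.cons_append, pvProduct, pvExtend, List.map_flatMap, List.flatMap_map, List.map_map, List.flatMap_assoc] at ih ⊢
    congr 1
    funext x
    have h2 := congrArg (List.map (fun q : List Char => x ++ q)) ih
    simpa [List.map_map, List.map_flatMap, Function.comp, List.append_assoc] using h2

-- A's combo_est = number of B's partials
theorem foldl_est_int (os : List (List (List Char))) (i : Int) :
    os.foldl (fun e o => e * (o.length : Int)) i = i * ((pvProduct os).length : Int) := by
  induction os generalizing i with
  | nil => simp [pvProduct]
  | cons a t ih => simp [pvProduct, List.foldl_cons, ih, List.length_flatMap]; ring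

-- loop invariant: B's partials are the joins of the product of A's options so far
theorem partialsB_eq (cs : List Char) (maxc : Int) (acc : List (List (List Char))) :
    pvPartialsB cs maxc ((pvProduct acc).map List.flatten)
      = (pvOptionsA cs maxc acc).map (fun os => (pvProduct os).map List.flatten) := by
  induction cs generalizing acc with
  | nil => simp [pvPartialsB, pvOptionsA]
  | cons c rest ih =>
    simp only [pvPartialsB, pvOptionsA]
    by_cases hd : PySem.Chars.isdigit c = true
    · simp only [if_pos hd]
      have hext : pvExtend ((pvProduct acc).map List.flatten) [[c]]
          = (pvProduct (acc ++ [[[c]]])).map List.flatten := (pvProduct_append_single _ _).symm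
      have hcap : ((pvExtend ((pvProduct acc).map List.flatten) [[c]]).length : Int)
          = (acc ++ [[[c]]]).foldl (fun e o => e * (o.length : Int)) 1 := by
        rw [hext, List.length_map, foldl_est_int, one_mul]
      rw [hcap, hext]
      split_ifs with h
      · rfl
      · exact ih _
    · simp only [if_neg hd]
      cases hop : pyCharOptions? c with
      | some opts =>
        dsimp only
        have hext : pvExtend ((pvProduct acc).map List.flatten) opts
            = (pvProduct (acc ++ [opts])).map List.flatten := (pvProduct_append_single _ _).symm
        have hcap : ((pvExtend ((pvProduct acc).map List.flatten) opts).length : Int)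
            = (acc ++ [opts]).foldl (fun e o => e * (o.length : Int)) 1 := by
          rw [hext, List.length_map, foldl_est_int, one_mul]
        rw [hcap, hext]
        split_ifs with h
        · rfl
        · exact ih _
      | none =>
        dsimp only
        by_cases hs : PySem.Chars.isspace c = true
        · simp only [if_pos hs]
          exact ih _
        · simp only [if_neg hs]
          rfl

-- ===== VERDICT (by name: the statement is the Claim_ definition above) =====
theorem expand_candidates_spec : Claim_equal_expand_candidates := by
  unfold Claim_equal_expand_candidates
  intro token maxc _
  unfold Spec_expand_candidates expand_candidates expand_candidates_alt
  have h := partialsB_eq token.toList maxc []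
  have hstart : ((pvProduct []).map List.flatten) = [[]] := rfl
  rw [hstart] at h
  rw [h]
  cases hA : pvOptionsA token.toList maxc [] with
  | none => rfl
  | some os =>
    simp only [Option.map_some]
    rcases eq_or_ne os [] with rfl | hne
    · rfl
    · simp only [if_neg hne, List.foldl_map]
      congr 1
      apply List.foldl_ext
      intro s parts _
      by_cases h1 : parts.flatten = [] <;>
        by_cases h2 : parts.flatten.length > 3 <;>
        by_cases h3 : PySem.Chars.startswith parts.flatten ['0'] = true <;>
        rw [List.length_flatten] at h2 <;>
        simp [h1, h2, h3]
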